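-- pv_equiv track=rewrite | github.com/UsmanAbbasi1/OrderSupportAgent | app/agents/pipeline.py | _simulate_fix
-- ===== SOURCE A (Python) =====
-- from copy import deepcopy
--
-- def _verify_order(order: dict) -> tuple[bool, list[str]]:
--     """Check basic consistency rules for an order.
--
--     This is our "sandbox" verification step: instead of trusting a fix blindly,
--     we assert simple business invariants.
--     """
--
--     issues: list[str] = []
--     status = order.get("status")
--     payment_status = order.get("payment_status")
--     shipment_status = order.get("shipment_status")
--
--     if status == "DELIVERED" and shipment_status != "DELIVERED":
--         issues.append("Order marked DELIVERED but shipment_status is not DELIVERED.")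
--
--     if payment_status == "CAPTURED" and status == "PENDING":
--         issues.append("Payment captured but order status is still PENDING.")
--
--     return (len(issues) == 0), issues
--
-- def _simulate_fix(order: dict) -> tuple[dict, list[str]]:
--     """Propose and apply a simple fix, then re-verify the order.
--
--     This function is intentionally simple but demonstrates the
--     reason-then-verify pattern: we look at issues, change fields, and then
--     call ``_verify_order`` again on the modified order.
--     """
--
--     fixed = deepcopy(order)
--     _, issues = _verify_order(order)
--
--     for issue in issues:
--         if "shipment_status is not DELIVERED" in issue:
--             # Safer move in absence of shipment confirmation is to roll the
--             # order status back from DELIVERED.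
--             fixed["status"] = "IN_TRANSIT"
--             fixed["shipment_status"] = "IN_TRANSIT"
--         if "status is still PENDING" in issue:
--             # If payment is captured but the order is PENDING, move it to PAID.
--             fixed["status"] = "PAID"
--
--     verified, remaining = _verify_order(fixed)
--     if not verified and not remaining:
--         # Should not normally happen, but keep behaviour explicit.
--         remaining = ["Unknown verification failure after applying fixes."]
--     return fixed, remaining
-- ===== SOURCE B (Python) =====
-- from copy import deepcopy
--
-- def _simulate_fix(order):
--     # Apply the two field-level invariant fixes directly, then re-check the
--     # invariants inline -- no intermediate issue-string list or substring parsing.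
--     fixed = deepcopy(order)
--     status = order.get("status")
--     if status == "DELIVERED" and order.get("shipment_status") != "DELIVERED":
--         fixed["status"] = "IN_TRANSIT"
--         fixed["shipment_status"] = "IN_TRANSIT"
--     if order.get("payment_status") == "CAPTURED" and status == "PENDING":
--         fixed["status"] = "PAID"
--     remaining = []
--     fs = fixed.get("status")
--     if fs == "DELIVERED" and fixed.get("shipment_status") != "DELIVERED":
--         remaining.append("Order marked DELIVERED but shipment_status is not DELIVERED.")
--     if fixed.get("payment_status") == "CAPTURED" and fs == "PENDING":
--         remaining.append("Payment captured but order status is still PENDING.")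
--     return fixed, remaining
-- ===== Notes on version B (the rewrite author's own statement) =====
-- stated objective: simpler
-- what changed: B drops the derive-issue-strings-then-substring-parse loop and the dead 'Unknown verification failure' guard: it tests the two field invariants directly on the order, applies the fixes to the copy, and re-checks the invariants inline.
import Mathlib
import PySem

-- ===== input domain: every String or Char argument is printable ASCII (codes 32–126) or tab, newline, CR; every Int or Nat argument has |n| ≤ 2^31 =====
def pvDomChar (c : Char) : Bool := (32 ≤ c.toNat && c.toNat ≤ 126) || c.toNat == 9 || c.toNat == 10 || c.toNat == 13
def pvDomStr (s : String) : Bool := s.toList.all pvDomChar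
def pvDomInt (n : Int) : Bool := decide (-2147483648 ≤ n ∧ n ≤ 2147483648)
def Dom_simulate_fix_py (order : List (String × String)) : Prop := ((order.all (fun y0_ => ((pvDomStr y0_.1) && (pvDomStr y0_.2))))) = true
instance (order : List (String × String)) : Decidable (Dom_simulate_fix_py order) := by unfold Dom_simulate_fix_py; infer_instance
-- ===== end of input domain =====

-- B replaces A's issue-string derivation and substring parsing by testing the two
-- field invariants directly on the order and re-checking them inline (objective: simpler).


-- ===== PORT A =====
-- _verify_order, transcribed: build the issue list, return (len == 0, issues)
def verify_order_py (order : PySem.Dict String String) : Bool × List String :=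
  let issues : List String := []
  let status := order.get? "status"
  let payment_status := order.get? "payment_status"
  let shipment_status := order.get? "shipment_status"
  let issues := if status == some "DELIVERED" && !(shipment_status == some "DELIVERED") then
      issues ++ ["Order marked DELIVERED but shipment_status is not DELIVERED."] else issues
  let issues := if payment_status == some "CAPTURED" && status == some "PENDING" then
      issues ++ ["Payment captured but order status is still PENDING."] else issues
  (issues.length == 0, issues)

def simulate_fix_py (order : List (String × String)) : (List (String × String)) × List String :=
  let d : PySem.Dict String String := PySem.Dict.mk order
  let fixed := d                                   -- deepcopy(order)
  let issues := (verify_order_py d).2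
  let fixed := issues.foldl (fun fixed issue =>
      let fixed := if PySem.Str.isIn "shipment_status is not DELIVERED" issue then
          ((fixed.insert "status" "IN_TRANSIT").insert "shipment_status" "IN_TRANSIT") else fixed
      if PySem.Str.isIn "status is still PENDING" issue then
          fixed.insert "status" "PAID" else fixed) fixed
  let vr := verify_order_py fixed
  let remaining := if !vr.1 && vr.2 == ([] : List String) then
      ["Unknown verification failure after applying fixes."] else vr.2
  (fixed.items, remaining)

-- ===== PORT B =====
def simulate_fix_py_alt (order : List (String × String)) : (List (String × String)) × List String :=
  let d : PySem.Dict String String := PySem.Dict.mk order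
  let status := d.get? "status"
  let fixed := if status == some "DELIVERED" && !(d.get? "shipment_status" == some "DELIVERED") then
      ((d.insert "status" "IN_TRANSIT").insert "shipment_status" "IN_TRANSIT") else d
  let fixed := if d.get? "payment_status" == some "CAPTURED" && status == some "PENDING" then
      fixed.insert "status" "PAID" else fixed
  let fs := fixed.get? "status"
  let remaining : List String :=
    (if fs == some "DELIVERED" && !(fixed.get? "shipment_status" == some "DELIVERED") then
        ["Order marked DELIVERED but shipment_status is not DELIVERED."] else []) ++
    (if fixed.get? "payment_status" == some "CAPTURED" && fs == some "PENDING" then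
        ["Payment captured but order status is still PENDING."] else [])
  (fixed.items, remaining)

-- ===== PRECONDITION & SPEC =====
def Spec_simulate_fix_py (order : List (String × String)) (out : (List (String × String)) × List String) : Prop := out = simulate_fix_py_alt order
instance (order : List (String × String)) (out : (List (String × String)) × List String) : Decidable (Spec_simulate_fix_py order out) := by unfold Spec_simulate_fix_py; infer_instance

-- ===== CLAIM (what is proved, stated in full; the proofs are below) =====
def Claim_equal_simulate_fix_py : Prop := ∀ (order : List (String × String)), Dom_simulate_fix_py order → Spec_simulate_fix_py order (simulate_fix_py order)

-- ===== LEMMAS AND PROOFS =====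

-- substring tests A performs on its two literal issue strings (char-list form, simp's normal form)
theorem isin1 : PySem.Chars.isIn ['s', 'h', 'i', 'p', 'm', 'e', 'n', 't', '_', 's', 't', 'a', 't', 'u', 's', ' ', 'i', 's', ' ', 'n', 'o', 't', ' ', 'D', 'E', 'L', 'I', 'V', 'E', 'R', 'E', 'D'] ['O', 'r', 'd', 'e', 'r', ' ', 'm', 'a', 'r', 'k', 'e', 'd', ' ', 'D', 'E', 'L', 'I', 'V', 'E', 'R', 'E', 'D', ' ', 'b', 'u', 't', ' ', 's', 'h', 'i', 'p', 'm', 'e', 'n', 't', '_', 's', 't', 'a', 't', 'u', 's', ' ', 'i', 's', ' ', 'n', 'o', 't', ' ', 'D', 'E', 'L', 'I', 'V', 'E', 'R', 'E', 'D', '.'] = true := by decide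
theorem isin2 : PySem.Chars.isIn ['s', 't', 'a', 't', 'u', 's', ' ', 'i', 's', ' ', 's', 't', 'i', 'l', 'l', ' ', 'P', 'E', 'N', 'D', 'I', 'N', 'G'] ['O', 'r', 'd', 'e', 'r', ' ', 'm', 'a', 'r', 'k', 'e', 'd', ' ', 'D', 'E', 'L', 'I', 'V', 'E', 'R', 'E', 'D', ' ', 'b', 'u', 't', ' ', 's', 'h', 'i', 'p', 'm', 'e', 'n', 't', '_', 's', 't', 'a', 't', 'u', 's', ' ', 'i', 's', ' ', 'n', 'o', 't', ' ', 'D', 'E', 'L', 'I', 'V', 'E', 'R', 'E', 'D', '.'] = false := by decide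
theorem isin3 : PySem.Chars.isIn ['s', 'h', 'i', 'p', 'm', 'e', 'n', 't', '_', 's', 't', 'a', 't', 'u', 's', ' ', 'i', 's', ' ', 'n', 'o', 't', ' ', 'D', 'E', 'L', 'I', 'V', 'E', 'R', 'E', 'D'] ['P', 'a', 'y', 'm', 'e', 'n', 't', ' ', 'c', 'a', 'p', 't', 'u', 'r', 'e', 'd', ' ', 'b', 'u', 't', ' ', 'o', 'r', 'd', 'e', 'r', ' ', 's', 't', 'a', 't', 'u', 's', ' ', 'i', 's', ' ', 's', 't', 'i', 'l', 'l', ' ', 'P', 'E', 'N', 'D', 'I', 'N', 'G', '.'] = false := by decide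
theorem isin4 : PySem.Chars.isIn ['s', 't', 'a', 't', 'u', 's', ' ', 'i', 's', ' ', 's', 't', 'i', 'l', 'l', ' ', 'P', 'E', 'N', 'D', 'I', 'N', 'G'] ['P', 'a', 'y', 'm', 'e', 'n', 't', ' ', 'c', 'a', 'p', 't', 'u', 'r', 'e', 'd', ' ', 'b', 'u', 't', ' ', 'o', 'r', 'd', 'e', 'r', ' ', 's', 't', 'a', 't', 'u', 's', ' ', 'i', 's', ' ', 's', 't', 'i', 'l', 'l', ' ', 'P', 'E', 'N', 'D', 'I', 'N', 'G', '.'] = true := by decide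

theorem simulate_fix_eq (order : List (String × String)) :
    simulate_fix_py order = simulate_fix_py_alt order := by
  unfold simulate_fix_py simulate_fix_py_alt
  set d : PySem.Dict String String := PySem.Dict.mk order with hd
  clear hd
  by_cases hs : d.get? "status" = some "DELIVERED"
  · by_cases hsh : d.get? "shipment_status" = some "DELIVERED"
    · simp [verify_order_py, hs, hsh]
    · simp [verify_order_py, hs, hsh, isin1, isin2, PySem.Dict.get?_insert]
  · have hs' : (d.get? "status" == some "DELIVERED") = false := by simp [hs]
    by_cases hp : d.get? "payment_status" = some "CAPTURED" ∧ d.get? "status" = some "PENDING"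
    · simp [verify_order_py, hp.1, hp.2, isin3, isin4, PySem.Dict.get?_insert]
    · have : (d.get? "payment_status" == some "CAPTURED" && d.get? "status" == some "PENDING") = false := by
        rcases not_and_or.mp hp with h | h <;> simp [h]
      simp [verify_order_py, hs', this]

-- ===== VERDICT (by name: the statement is the Claim_ definition above) =====
theorem simulate_fix_py_spec : Claim_equal_simulate_fix_py := by
  intro order _
  exact (simulate_fix_eq order).symm ▸ rfl
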